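-- pv_equiv track=rewrite | github.com/Abdulla-Al-Kafi/Data_Structures_CSE220_BRACU | Lab_01/Task_08.py | arraySeries
-- ===== SOURCE A (Python) =====
-- def arraySeries(n):
--   len_of_array=n*n
--   array=[0]*len_of_array
--   idx=len(array)-1
--
--   for i in range(0,n):
--     for j in range(0,n-i):
--       array[idx]=j+1
--       idx=idx-1
--     idx=idx-i
--   return array
-- ===== SOURCE B (Python) =====
-- def arraySeries(n):
--   result = [0] * (n * n)
--   for b in range(n):
--     end = (b + 1) * n
--     result[end - (b + 1):end] = reversed(range(1, b + 2))
--   return result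
-- ===== Notes on version B (the rewrite author's own statement) =====
-- stated objective: alternative
-- what changed: Replaces A's backward-running write pointer with its per-element inner loop and gap-skip (idx -= i) by a single forward loop over blocks that splices each descending run 1..b+1 into a preallocated zero array at a closed-form slice position.
import Mathlib
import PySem

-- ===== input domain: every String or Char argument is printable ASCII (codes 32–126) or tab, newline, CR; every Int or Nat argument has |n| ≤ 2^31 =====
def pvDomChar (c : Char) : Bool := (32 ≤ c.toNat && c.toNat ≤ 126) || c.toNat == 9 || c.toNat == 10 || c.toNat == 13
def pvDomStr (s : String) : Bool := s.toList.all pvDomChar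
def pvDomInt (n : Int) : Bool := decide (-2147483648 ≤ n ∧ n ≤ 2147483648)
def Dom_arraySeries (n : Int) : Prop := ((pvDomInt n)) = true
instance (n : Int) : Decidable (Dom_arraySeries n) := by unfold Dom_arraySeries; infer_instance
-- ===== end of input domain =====

-- B replaces A's backward-running write pointer (inner per-element loop + gap skip) by a forward
-- loop splicing each descending run into a preallocated zero array at a closed-form slice; alternative, same cost.


-- ===== PORT A =====
-- array[idx] = j+1 is ported as List.set idx.toNat: exact, since whenever A executes the
-- assignment idx is in range [0, len(array)) (the loops only run for n ≥ 1, and the pointer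
-- then descends through valid positions only).
def arraySeries (n : Int) : List Int :=
  let lenOfArray := n * n
  let array : List Int := List.replicate lenOfArray.toNat 0
  let idx : Int := (array.length : Int) - 1
  let st := (PySem.List.pyRange 0 n).foldl
    (fun (st : List Int × Int) i =>
      let st2 := (PySem.List.pyRange 0 (n - i)).foldl
        (fun (st : List Int × Int) j => (st.1.set st.2.toNat (j + 1), st.2 - 1)) st
      (st2.1, st2.2 - i)) (array, idx)
  st.1

-- ===== PORT B =====
-- result[end-(b+1):end] = reversed(range(1, b+2)) is ported as take/drop splicing: exact here,
-- since 0 ≤ end-(b+1) ≤ end ≤ len(result) for every b in range(n) and the iterable has length b+1.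
def arraySeries_alt (n : Int) : List Int :=
  (PySem.List.pyRange 0 n).foldl
    (fun (result : List Int) b =>
      let e := (b + 1) * n
      result.take (e - (b + 1)).toNat
        ++ (PySem.List.pyRange 1 (b + 2)).reverse
        ++ result.drop e.toNat)
    (List.replicate (n * n).toNat 0)

-- ===== PRECONDITION & SPEC =====
def Spec_arraySeries (n : Int) (out : List Int) : Prop := out = arraySeries_alt n
instance (n : Int) (out : List Int) : Decidable (Spec_arraySeries n out) := by unfold Spec_arraySeries; infer_instance

-- ===== CLAIM (what is proved, stated in full; the proofs are below) =====
def Claim_equal_arraySeries : Prop := ∀ (n : Int), Dom_arraySeries n → Spec_arraySeries n (arraySeries n)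

-- ===== LEMMAS AND PROOFS =====

-- [k, k-1, …, 1], the descending run both programs write
def pvDesc : Nat → List Int
  | 0 => []
  | k + 1 => ((k : Int) + 1) :: pvDesc k

-- the b-th block (from the front) of the final array, 0 ≤ b < N
def pvBlock (N b : Nat) : List Int := List.replicate (N - 1 - b) 0 ++ pvDesc (b + 1)

-- concatenation of blocks b, b+1, …, b+m-1
def pvBlocks (N b m : Nat) : List Int := ((List.range' b m).map (pvBlock N)).flatten

lemma pvInner (m : Nat) : ∀ (X S Z : List Int), S.length = m →
    (PySem.List.pyRange 0 (m : Int)).foldl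
      (fun (st : List Int × Int) j => (st.1.set st.2.toNat (j + 1), st.2 - 1))
      (X ++ S ++ Z, (X.length : Int) + m - 1)
    = (X ++ pvDesc m ++ Z, (X.length : Int) - 1) := by
  induction m with
  | zero =>
    intro X S Z hS
    rw [List.eq_nil_of_length_eq_zero hS]
    simp [pvDesc, show PySem.List.pyRange 0 (0:Int) = [] from rfl]
  | succ m ih =>
    intro X S Z hS
    cases S with
    | nil => simp at hS
    | cons s0 S' =>
      rw [show (((m+1:Nat)):Int) = (m:Int) + 1 by push_cast; ring,
          PySem.List.pyRange_one_succ_right (by positivity), List.foldl_append]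
      have h0 : (X ++ s0 :: S' ++ Z, (X.length : Int) + ((m:Int)+1) - 1)
          = ((X ++ [s0]) ++ S' ++ Z, ((X ++ [s0]).length : Int) + (m:Int) - 1) := by
        simp; omega
      rw [h0, ih (X ++ [s0]) S' Z (by simpa using hS)]
      simp only [List.foldl_cons, List.foldl_nil]
      have hidx : (((X ++ [s0]).length : Int) - 1) = (X.length : Int) := by simp
      rw [hidx]
      refine Prod.ext ?_ rfl
      show (((X ++ [s0]) ++ pvDesc m ++ Z).set (X.length:Int).toNat ((m:Int) + 1)) = X ++ pvDesc (m+1) ++ Z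
      rw [Int.toNat_natCast]
      have h1 : (X ++ [s0]) ++ pvDesc m ++ Z = X ++ s0 :: (pvDesc m ++ Z) := by simp
      rw [h1]
      simp [pvDesc]

lemma pvBlocks_cons (N b m : Nat) : pvBlocks N b (m + 1) = pvBlock N b ++ pvBlocks N (b+1) m := by
  simp [pvBlocks, List.range'_succ]

lemma pvBlocks_length (N b m : Nat) (h : b + m ≤ N) : (pvBlocks N b m).length = m * N := by
  induction m generalizing b with
  | zero => simp [pvBlocks]
  | succ m ih =>
    have hB : (pvBlock N b).length = N := by
      simp [pvBlock, show (pvDesc (b+1)).length = b+1 from by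
        induction (b+1) with | zero => rfl | succ k ihk => simp [pvDesc, ihk]]
      omega
    rw [pvBlocks_cons, List.length_append, ih (b+1) (by omega), hB]
    ring

lemma pvBlocks_snoc (N m : Nat) : pvBlocks N 0 (m + 1) = pvBlocks N 0 m ++ pvBlock N m := by
  simp [pvBlocks, List.range'_1_concat]

lemma pvRange_rev (k : Nat) : (PySem.List.pyRange 1 ((k : Int) + 1)).reverse = pvDesc k := by
  induction k with
  | zero => rfl
  | succ k ih =>
    rw [show (((k+1:Nat)):Int) + 1 = ((k:Int)+1)+1 by push_cast; ring,
        PySem.List.pyRange_one_succ_right (by omega)]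
    simp only [List.reverse_append, List.reverse_cons, List.reverse_nil, List.nil_append,
      List.singleton_append, ih, pvDesc]

lemma pvRange_nil (n : Int) (h : n ≤ 0) : PySem.List.pyRange 0 n = [] := by
  rw [PySem.List.pyRange_of_pos 0 n (by norm_num)]
  simp [show ¬ (0 < n) from by omega]

lemma pvOuter (N : Nat) : ∀ r : Nat, r ≤ N →
    ((PySem.List.pyRange ((N : Int) - r) (N : Int)).foldl
      (fun (st : List Int × Int) i =>
        let st2 := (PySem.List.pyRange 0 ((N : Int) - i)).foldl
          (fun (st : List Int × Int) j => (st.1.set st.2.toNat (j + 1), st.2 - 1)) st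
        (st2.1, st2.2 - i))
      (List.replicate (r * N) 0 ++ pvBlocks N r (N - r), ((r * N : Nat) : Int) - 1)).1
    = pvBlocks N 0 N := by
  intro r
  induction r with
  | zero =>
    intro _
    have h1 : PySem.List.pyRange ((N:Int) - (0:Nat)) (N:Int) = [] := by
      rw [PySem.List.pyRange_of_pos _ _ (by norm_num)]; simp
    rw [h1]; simp
  | succ r ih =>
    intro hr
    have hmul : (r+1) * N = r * N + N := by ring
    have hcons : PySem.List.pyRange ((N:Int) - ((r+1:Nat):Int)) (N:Int)
        = ((N:Int) - ((r+1:Nat):Int)) :: PySem.List.pyRange ((N:Int) - (r:Nat)) (N:Int) := by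
      have e1 : (N:Int) - ((r+1:Nat):Int) + 1 = (N:Int) - ((r:Nat):Int) := by push_cast; ring
      rw [PySem.List.pyRange_one_cons (by push_cast; omega), e1]
    rw [hcons, List.foldl_cons]
    have hin : PySem.List.pyRange 0 ((N:Int) - ((N:Int) - ((r+1:Nat):Int))) = PySem.List.pyRange 0 (((r+1:Nat)):Int) := by
      congr 1; ring
    have harr1 : List.replicate ((r+1) * N) (0:Int)
        = List.replicate ((r+1)*N - (r+1)) (0:Int) ++ List.replicate (r+1) (0:Int) := by
      rw [List.replicate_append_replicate]; congr 1; omega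
    have hlen : ((List.replicate ((r+1)*N - (r+1)) (0:Int)).length : Int) = ((r+1)*N - (r+1) : Nat) := by simp
    have hstate : (List.replicate ((r+1) * N) (0:Int) ++ pvBlocks N (r+1) (N - (r+1)), (((r+1) * N : Nat) : Int) - 1)
        = ((List.replicate ((r+1)*N - (r+1)) (0:Int) ++ List.replicate (r+1) (0:Int) ++ pvBlocks N (r+1) (N - (r+1))),
           ((List.replicate ((r+1)*N - (r+1)) (0:Int)).length : Int) + ((r+1:Nat):Int) - 1) := by
      refine Prod.ext ?_ ?_
      · show List.replicate ((r+1) * N) (0:Int) ++ pvBlocks N (r+1) (N - (r+1)) = _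
        rw [harr1]
      · show (((r+1) * N : Nat) : Int) - 1 = _
        rw [hlen]
        omega
    have harr : List.replicate ((r+1)*N - (r+1)) (0:Int) ++ pvDesc (r+1) ++ pvBlocks N (r+1) (N - (r+1))
        = List.replicate (r * N) 0 ++ pvBlocks N r (N - r) := by
      rw [show (r+1)*N - (r+1) = r * N + (N - 1 - r) by omega,
          ← List.replicate_append_replicate, show N - r = (N - (r+1)) + 1 by omega,
          pvBlocks_cons, pvBlock]
      simp only [List.append_assoc]
    have hidx : ((List.replicate ((r+1)*N - (r+1)) (0:Int)).length : Int) - 1 - ((N:Int) - ((r+1:Nat):Int))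
        = ((r * N : Nat) : Int) - 1 := by
      rw [hlen]; omega
    have hstep : (let st2 := (List.foldl
          (fun (st : List Int × Int) j => (st.1.set st.2.toNat (j + 1), st.2 - 1))
          (List.replicate ((r+1) * N) 0 ++ pvBlocks N (r+1) (N - (r+1)), (((r+1) * N : Nat) : Int) - 1)
          (PySem.List.pyRange 0 ((N:Int) - ((N:Int) - ((r+1:Nat):Int)))));
        (st2.1, st2.2 - ((N:Int) - ((r+1:Nat):Int))))
        = (List.replicate (r * N) 0 ++ pvBlocks N r (N - r), ((r * N : Nat) : Int) - 1) := by
      show (Prod.mk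
          (List.foldl (fun (st : List Int × Int) j => (st.1.set st.2.toNat (j + 1), st.2 - 1))
            (List.replicate ((r+1) * N) 0 ++ pvBlocks N (r+1) (N - (r+1)), (((r+1) * N : Nat) : Int) - 1)
            (PySem.List.pyRange 0 ((N:Int) - ((N:Int) - ((r+1:Nat):Int))))).1
          ((List.foldl (fun (st : List Int × Int) j => (st.1.set st.2.toNat (j + 1), st.2 - 1))
            (List.replicate ((r+1) * N) 0 ++ pvBlocks N (r+1) (N - (r+1)), (((r+1) * N : Nat) : Int) - 1)
            (PySem.List.pyRange 0 ((N:Int) - ((N:Int) - ((r+1:Nat):Int))))).2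
           - ((N:Int) - ((r+1:Nat):Int)))) = _
      rw [hin, hstate]
      rw [show List.foldl (fun (st : List Int × Int) j => (st.1.set st.2.toNat (j + 1), st.2 - 1))
            (List.replicate ((r+1)*N - (r+1)) (0:Int) ++ List.replicate (r+1) (0:Int) ++ pvBlocks N (r+1) (N - (r+1)),
             ((List.replicate ((r+1)*N - (r+1)) (0:Int)).length : Int) + ((r+1:Nat):Int) - 1)
            (PySem.List.pyRange 0 (((r+1:Nat)):Int))
          = (List.replicate ((r+1)*N - (r+1)) (0:Int) ++ pvDesc (r+1) ++ pvBlocks N (r+1) (N - (r+1)),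
             ((List.replicate ((r+1)*N - (r+1)) (0:Int)).length : Int) - 1)
          from pvInner (r+1) _ _ _ (by simp)]
      exact Prod.ext harr hidx
    rw [hstep]
    exact ih (by omega)

lemma pvBpartial (N : Nat) (hN : 0 < N) : ∀ k : Nat, k ≤ N →
    (PySem.List.pyRange 0 (k : Int)).foldl
      (fun (result : List Int) b =>
        let e := (b + 1) * (N : Int)
        result.take (e - (b + 1)).toNat
          ++ (PySem.List.pyRange 1 (b + 2)).reverse
          ++ result.drop e.toNat)
      (List.replicate (N * N) 0)
    = pvBlocks N 0 k ++ List.replicate (N * N - k * N) 0 := by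
  intro k
  induction k with
  | zero =>
    intro _
    simp [show PySem.List.pyRange 0 (0:Int) = [] from rfl, pvBlocks]
  | succ k ih =>
    intro hk
    have hle1 : k + 1 ≤ (k+1) * N := Nat.le_mul_of_pos_right (k+1) hN
    have hmul : (k+1) * N = k * N + N := by ring
    have hkN : k * N + N ≤ N * N := by
      calc k * N + N = (k+1) * N := by ring
        _ ≤ N * N := Nat.mul_le_mul_right N hk
    rw [show ((k+1:Nat):Int) = (k:Int) + 1 by push_cast; ring,
        PySem.List.pyRange_one_succ_right (by positivity), List.foldl_append, ih (by omega),
        List.foldl_cons, List.foldl_nil]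
    have he : (((k:Int) + 1) * (N:Int)).toNat = k * N + N := by
      rw [show ((k:Int) + 1) * (N:Int) = ((k * N + N : Nat) : Int) by push_cast; ring, Int.toNat_natCast]
    have hs : (((k:Int) + 1) * (N:Int) - ((k:Int) + 1)).toNat = k * N + (N - 1 - k) := by
      rw [show ((k:Int) + 1) * (N:Int) - ((k:Int) + 1) = (((k+1) * N - (k+1) : Nat) : Int) by
        rw [Nat.cast_sub hle1]; push_cast; ring, Int.toNat_natCast]
      omega
    simp only [hs, he]
    have hlenB : (pvBlocks N 0 k).length = k * N := pvBlocks_length N 0 k (by omega)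
    have htake : ((pvBlocks N 0 k ++ List.replicate (N * N - k * N) (0:Int)).take (k * N + (N - 1 - k)))
        = pvBlocks N 0 k ++ List.replicate (N - 1 - k) 0 := by
      rw [show k * N + (N - 1 - k) = (pvBlocks N 0 k).length + (N - 1 - k) by rw [hlenB],
          List.take_length_add_append, List.take_replicate, min_eq_left (by omega : N - 1 - k ≤ N * N - k * N)]
    have hdrop : ((pvBlocks N 0 k ++ List.replicate (N * N - k * N) (0:Int)).drop (k * N + N))
        = List.replicate (N * N - (k * N + N)) 0 := by
      rw [show k * N + N = (pvBlocks N 0 k).length + N by rw [hlenB],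
          List.drop_length_add_append, List.drop_replicate]
      congr 1
      omega
    have hrev : (PySem.List.pyRange 1 ((k:Int) + 2)).reverse = pvDesc (k+1) := by
      rw [show (k:Int) + 2 = ((k+1:Nat):Int) + 1 by push_cast; ring]
      exact pvRange_rev (k+1)
    rw [htake, hdrop, hrev, pvBlocks_snoc, pvBlock, hmul]
    simp only [List.append_assoc]

-- ===== VERDICT (by name: the statement is the Claim_ definition above) =====
theorem arraySeries_spec : Claim_equal_arraySeries := by
  intro n _
  unfold Spec_arraySeries
  show arraySeries n = arraySeries_alt n
  by_cases hn : 0 < n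
  · have hN : 0 < n.toNat := by omega
    obtain ⟨N, rfl⟩ : ∃ N : Nat, ((N : Int)) = n := ⟨n.toNat, Int.toNat_of_nonneg (by omega)⟩
    have hN' : 0 < N := by omega
    have hNN : ((N : Int) * (N : Int)).toNat = N * N := by
      rw [show (N : Int) * (N : Int) = ((N * N : Nat) : Int) by push_cast; ring, Int.toNat_natCast]
    have hA : arraySeries (N : Int) = pvBlocks N 0 N := by
      show ((PySem.List.pyRange 0 (N : Int)).foldl
        (fun (st : List Int × Int) i =>
          let st2 := (PySem.List.pyRange 0 ((N : Int) - i)).foldl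
            (fun (st : List Int × Int) j => (st.1.set st.2.toNat (j + 1), st.2 - 1)) st
          (st2.1, st2.2 - i))
        (List.replicate ((N : Int) * (N : Int)).toNat 0,
         ((List.replicate ((N : Int) * (N : Int)).toNat (0 : Int)).length : Int) - 1)).1 = pvBlocks N 0 N
      have h0 : PySem.List.pyRange 0 ((N : Int)) = PySem.List.pyRange ((N : Int) - (N : Nat)) ((N : Int)) := by
        congr 1
        ring
      have hinit : (List.replicate ((N : Int) * (N : Int)).toNat (0 : Int),
            ((List.replicate ((N : Int) * (N : Int)).toNat (0 : Int)).length : Int) - 1)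
          = (List.replicate (N * N) 0 ++ pvBlocks N N (N - N), ((N * N : Nat) : Int) - 1) := by
        refine Prod.ext ?_ ?_
        · show List.replicate ((N : Int) * (N : Int)).toNat (0 : Int) = _
          rw [hNN, Nat.sub_self, show pvBlocks N N 0 = [] from rfl, List.append_nil]
        · show ((List.replicate ((N : Int) * (N : Int)).toNat (0 : Int)).length : Int) - 1 = _
          rw [hNN]; simp
      rw [h0, hinit]
      exact pvOuter N N le_rfl
    have hB : arraySeries_alt (N : Int) = pvBlocks N 0 N := by
      show (PySem.List.pyRange 0 (N : Int)).foldl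
        (fun (result : List Int) b =>
          let e := (b + 1) * (N : Int)
          result.take (e - (b + 1)).toNat
            ++ (PySem.List.pyRange 1 (b + 2)).reverse
            ++ result.drop e.toNat)
        (List.replicate ((N : Int) * (N : Int)).toNat 0) = pvBlocks N 0 N
      rw [hNN, pvBpartial N hN' N le_rfl, Nat.sub_self]
      simp
    rw [hA, hB]
  · have hnil : PySem.List.pyRange 0 n = [] := pvRange_nil n (by omega)
    show ((PySem.List.pyRange 0 n).foldl _ (_, _)).1 = (PySem.List.pyRange 0 n).foldl _ _
    rw [hnil]
    rfl
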